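-- pv_equiv track=rewrite | github.com/Gvozdyara/Vocabulary_builder | vocabulary_builder.py | group_same_words
-- ===== SOURCE A (Python) =====
-- def group_same_words(list):
--     # bar = IncrementalBar('Processing', max=len(list))
--     output_list = []
--     i = 0
--     while i < len(list):
--         for r in range(len(list)):
--
--             if list[i] not in output_list:
--                 j = 0
--                 while j < list.count(list[i]):
--                     output_list.append(list[i])
--                     j += 1
--                 i += 1
--             else:
--                 i += 1
--     #         bar.next()
--     # bar.finish()
--     return output_list
-- ===== SOURCE B (Python) =====
-- def group_same_words(list):
--     keys = []
--     groups = []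
--     for x in list:
--         if x in keys:
--             groups[keys.index(x)].append(x)
--         else:
--             keys.append(x)
--             groups.append([x])
--     out = []
--     for g in groups:
--         out += g
--     return out
-- ===== Notes on version B (the rewrite author's own statement) =====
-- stated objective: simpler
-- what changed: B makes one pass maintaining ordered buckets (a keys list plus parallel groups), appending each element into its bucket, then concatenates the buckets; A re-scans the whole list with list.count at each first occurrence and checks membership in the growing output list.
import Mathlib
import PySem

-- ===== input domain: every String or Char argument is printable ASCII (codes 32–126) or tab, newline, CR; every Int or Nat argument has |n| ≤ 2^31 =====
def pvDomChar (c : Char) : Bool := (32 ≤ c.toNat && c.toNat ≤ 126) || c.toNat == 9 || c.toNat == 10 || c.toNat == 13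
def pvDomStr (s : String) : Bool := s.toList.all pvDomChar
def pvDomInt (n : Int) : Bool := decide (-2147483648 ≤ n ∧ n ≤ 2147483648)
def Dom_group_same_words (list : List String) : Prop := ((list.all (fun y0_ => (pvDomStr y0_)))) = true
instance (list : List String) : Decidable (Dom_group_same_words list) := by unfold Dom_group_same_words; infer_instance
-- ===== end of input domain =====

-- B groups equal words with ordered buckets (keys list + parallel groups) in one pass, then
-- concatenates the buckets, instead of A's nested scans with list.count at each first occurrence.

-- ===== PORT A =====
-- inner 'while j < list.count(list[i]): output_list.append(list[i]); j += 1'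
def pvAppendLoop (out : List String) (x : String) : Nat → List String
  | 0 => out
  | j + 1 => pvAppendLoop (out ++ [x]) x j

-- A's while/for pair increments i exactly once per inner iteration, visiting each element once in order.
def group_same_words (list : List String) : List String :=
  list.foldl
    (fun output_list x =>
      if !(output_list.contains x) then pvAppendLoop output_list x (PySem.List.count list x)
      else output_list)
    []

-- ===== PORT B =====
def group_same_words_alt (list : List String) : List String :=
  let st := list.foldl
    (fun (st : List String × List (List String)) x =>
      match PySem.List.index? st.1 x with
      | some idx => (st.1, st.2.modify idx (fun g => g ++ [x]))
      | none => (st.1 ++ [x], st.2 ++ [[x]]))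
    ([], [])
  st.2.foldl (fun out g => out ++ g) []

-- ===== PRECONDITION & SPEC =====
def Spec_group_same_words (list : List String) (out : List String) : Prop := out = group_same_words_alt list
instance (list : List String) (out : List String) : Decidable (Spec_group_same_words list out) := by unfold Spec_group_same_words; infer_instance

-- ===== CLAIM (what is proved, stated in full; the proofs are below) =====
def Claim_equal_group_same_words : Prop := ∀ (list : List String), Dom_group_same_words list → Spec_group_same_words list (group_same_words list)

-- ===== LEMMAS AND PROOFS =====

-- first-occurrence keys of s, appended to an accumulator ks
def pvK (ks : List String) : List String → List String
  | [] => ks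
  | x :: s => pvK (if x ∈ ks then ks else ks ++ [x]) s

theorem pvAppendLoop_eq (x : String) (n : Nat) (out : List String) :
    pvAppendLoop out x n = out ++ List.replicate n x := by
  induction n generalizing out with
  | zero => simp [pvAppendLoop]
  | succ j ih => simp [pvAppendLoop, ih, List.replicate_succ]

theorem pv_foldA (s : List String) (full : List String) (keys : List String)
    (hk : ∀ k ∈ keys, 0 < full.count k)
    (hs : ∀ x ∈ s, 0 < full.count x) :
    s.foldl
      (fun output_list x =>
        if !(output_list.contains x) then pvAppendLoop output_list x (PySem.List.count full x)
        else output_list)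
      (keys.flatMap fun k => List.replicate (full.count k) k)
      = (pvK keys s).flatMap fun k => List.replicate (full.count k) k := by
  induction s generalizing keys with
  | nil => simp [pvK]
  | cons x s ih =>
    have hmem : (x ∈ keys.flatMap fun k => List.replicate (full.count k) k) ↔ x ∈ keys := by
      simp only [List.mem_flatMap, List.mem_replicate]
      constructor
      · rintro ⟨k, hkmem, -, rfl⟩; exact hkmem
      · intro h; exact ⟨x, h, (hk x h).ne', rfl⟩
    by_cases hx : x ∈ keys
    · rw [List.foldl_cons, if_neg (by simp; exact ⟨hx, (hk x hx).ne'⟩)]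
      rw [show pvK keys (x :: s) = pvK keys s by simp [pvK, hx]]
      exact ih keys hk (fun y hy => hs y (List.mem_cons_of_mem _ hy))
    · rw [List.foldl_cons, if_pos (by simp; exact Or.inl hx)]
      rw [pvAppendLoop_eq, PySem.List.count_eq]
      rw [show (keys.flatMap fun k => List.replicate (full.count k) k) ++ List.replicate (full.count x) x
            = (keys ++ [x]).flatMap fun k => List.replicate (full.count k) k by
        simp [List.flatMap_append]]
      rw [show pvK keys (x :: s) = pvK (keys ++ [x]) s by simp [pvK, hx]]
      exact ih (keys ++ [x])
        (fun k hkm => by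
          rcases List.mem_append.mp hkm with h | h
          · exact hk k h
          · simp at h; subst h; exact hs k (List.mem_cons_self))
        (fun y hy => hs y (List.mem_cons_of_mem _ hy))

theorem pv_modify_map (keys : List String) (x : String) (c : String → Nat) (idx : Nat)
    (hnd : keys.Nodup) (h : PySem.List.index? keys x = some idx) :
    (keys.map fun k => List.replicate (c k) k).modify idx (fun g => g ++ [x])
      = keys.map fun k => List.replicate (if k = x then c k + 1 else c k) k := by
  induction keys generalizing idx with
  | nil => simp [PySem.List.index?] at h
  | cons k ks ih =>
    by_cases hkx : k = x
    · subst hkx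
      rw [PySem.List.index?_cons_self] at h
      obtain rfl : (0 : Nat) = idx := Option.some_inj.mp h
      simp only [List.map_cons, List.modify_zero_cons]
      rw [← List.replicate_succ']
      congr 1
      refine (List.map_congr_left fun y hy => ?_)
      have : y ≠ k := fun e => (List.nodup_cons.mp hnd).1 (e ▸ hy)
      simp [this]
    · rw [PySem.List.index?_cons_of_ne ks hkx] at h
      obtain ⟨i, hi, rfl⟩ := Option.map_eq_some_iff.mp h
      simp only [List.map_cons, List.modify_succ_cons]
      rw [ih i (List.nodup_cons.mp hnd).2 hi]
      simp [hkx]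

theorem pv_foldB (s : List String) (keys : List String) (c : String → Nat)
    (hnd : keys.Nodup) (h0 : ∀ x, x ∉ keys → c x = 0) :
    s.foldl
      (fun (st : List String × List (List String)) x =>
        match PySem.List.index? st.1 x with
        | some idx => (st.1, st.2.modify idx (fun g => g ++ [x]))
        | none => (st.1 ++ [x], st.2 ++ [[x]]))
      (keys, keys.map fun k => List.replicate (c k) k)
      = (pvK keys s, (pvK keys s).map fun k => List.replicate (c k + s.count k) k) := by
  induction s generalizing keys c with
  | nil => simp [pvK]
  | cons x s ih =>
    by_cases hx : x ∈ keys
    · obtain ⟨idx, hidx⟩ := (PySem.List.index?_isSome_iff keys x).mpr hx |> Option.isSome_iff_exists.mp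
      simp only [List.foldl_cons, hidx]
      rw [pv_modify_map keys x c idx hnd hidx]
      rw [ih keys (fun k => if k = x then c k + 1 else c k) hnd
        (fun y hy => by
          have hne : y ≠ x := fun e => hy (e ▸ hx)
          simp only [if_neg hne]; exact h0 y hy)]
      rw [show pvK keys (x :: s) = pvK keys s by simp [pvK, hx]]
      congr 1
      refine List.map_congr_left fun k _ => ?_
      by_cases hkx : k = x
      · subst hkx; simp [List.count_cons_self]; ring_nf
      · have hxk : ¬ x = k := fun e => hkx e.symm
        simp [hkx, hxk]
    · have hnone : PySem.List.index? keys x = none := (PySem.List.index?_eq_none_iff keys x).mpr hx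
      simp only [List.foldl_cons, hnone]
      have hmap : keys.map (fun k => List.replicate (c k) k) ++ [[x]]
          = (keys ++ [x]).map fun k => List.replicate (if k = x then 1 else c k) k := by
        rw [List.map_append]
        congr 1
        · refine (List.map_congr_left fun y hy => ?_).symm
          have : y ≠ x := fun e => hx (e ▸ hy)
          simp [this]
        · simp
      rw [hmap]
      rw [ih (keys ++ [x]) (fun k => if k = x then 1 else c k)
        (by simp [List.nodup_append, hnd]; exact fun a ha e => hx (e ▸ ha))
        (fun y hy => by
          simp only [List.mem_append, List.mem_singleton, not_or] at hy
          simp only [if_neg hy.2]; exact h0 y hy.1)]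
      rw [show pvK keys (x :: s) = pvK (keys ++ [x]) s by simp [pvK, hx]]
      congr 1
      refine List.map_congr_left fun k _ => ?_
      by_cases hkx : k = x
      · subst hkx
        simp [h0 k hx, List.count_cons_self]; ring_nf
      · have hxk : ¬ x = k := fun e => hkx e.symm
        simp [hkx, hxk]

theorem pv_foldl_append (gs : List (List String)) (acc : List String) :
    gs.foldl (fun out g => out ++ g) acc = acc ++ gs.flatten := by
  induction gs generalizing acc with
  | nil => simp
  | cons g gs ih => simp [ih]

theorem pv_A_eq (list : List String) :
    group_same_words list = (pvK [] list).flatMap fun k => List.replicate (list.count k) k := by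
  unfold group_same_words
  have := pv_foldA list list [] (by simp)
    (fun x hx => List.count_pos_iff.mpr hx)
  simpa using this

theorem pv_B_eq (list : List String) :
    group_same_words_alt list = (pvK [] list).flatMap fun k => List.replicate (list.count k) k := by
  unfold group_same_words_alt
  have := pv_foldB list [] (fun _ => 0) List.nodup_nil (fun _ _ => rfl)
  simp only [List.map_nil] at this
  rw [this, pv_foldl_append]
  simp [List.flatMap_def]

-- ===== VERDICT (by name: the statement is the Claim_ definition above) =====
theorem group_same_words_spec : Claim_equal_group_same_words := by
  intro list _
  unfold Spec_group_same_words
  rw [pv_A_eq, pv_B_eq]
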